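-- pv_equiv track=rewrite | github.com/Markcsx/zeus_project | backend_django/inventory/views.py | simulate_stock
-- ===== SOURCE A (Python) =====
-- def simulate_stock(start_stock, demand, incoming=None):
--     incoming = incoming or []
--     projection = []
--     stock = start_stock
--     oos_month = None
--
--     for idx, qty in enumerate(demand):
--         if idx < len(incoming):
--             stock += incoming[idx]
--         stock = max(stock - qty, 0)
--         projection.append(stock)
--         if stock == 0 and oos_month is None and qty > 0:
--             oos_month = idx
--     return projection, oos_month
-- ===== SOURCE B (Python) =====
-- def simulate_stock(start_stock, demand, incoming=None):
--     inc = incoming or []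
--     # net change per month
--     nets = [(inc[i] if i < len(inc) else 0) - q for i, q in enumerate(demand)]
--     # Prefix sums with a running minimum: the clamped stock
--     # max(stock + net, 0) repeated equals P_i - min(-start, P_1..P_i).
--     projection = []
--     p = 0
--     m = -start_stock
--     for net in nets:
--         p += net
--         if p < m:
--             m = p
--         projection.append(p - m)
--     # first month with zero stock and positive demand
--     oos_month = next((i for i, (s, q) in enumerate(zip(projection, demand))
--                       if s == 0 and q > 0), None)
--     return projection, oos_month
-- ===== Notes on version B (the rewrite author's own statement) =====
-- stated objective: alternative
-- what changed: B drops A's clamped recurrence stock = max(stock + net - qty, 0): it builds the net-change list, then computes each month's stock as prefix sum minus running minimum (P_i - min(-start, P_1..P_i), mathematically equal to the repeatedly clamped sum), and finds the out-of-stock month by a separate first-match scan.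
import Mathlib
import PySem

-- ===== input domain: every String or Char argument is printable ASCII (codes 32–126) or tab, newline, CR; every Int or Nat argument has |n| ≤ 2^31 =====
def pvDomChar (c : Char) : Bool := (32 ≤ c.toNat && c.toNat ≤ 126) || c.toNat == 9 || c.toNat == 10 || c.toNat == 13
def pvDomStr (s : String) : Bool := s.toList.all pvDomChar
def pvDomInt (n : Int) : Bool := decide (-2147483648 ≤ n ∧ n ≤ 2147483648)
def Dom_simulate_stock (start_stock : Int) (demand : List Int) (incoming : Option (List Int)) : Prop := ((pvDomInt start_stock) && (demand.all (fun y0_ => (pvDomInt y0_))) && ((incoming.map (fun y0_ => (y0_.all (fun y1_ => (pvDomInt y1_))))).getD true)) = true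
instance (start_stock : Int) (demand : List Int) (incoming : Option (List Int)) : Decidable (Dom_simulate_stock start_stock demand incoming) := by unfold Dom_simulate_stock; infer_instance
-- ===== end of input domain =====

-- B replaces A's clamped simulation max(stock+net,0) by a prefix-sum/running-minimum
-- recurrence (stock_i = P_i - min(-start, P_1..P_i)) and a separate first-match scan
-- for the out-of-stock month (objective: alternative algorithm, same cost).

-- ===== PORT A =====
def simulate_stock (start_stock : Int) (demand : List Int) (incoming : Option (List Int)) : List Int × Option Int :=
  -- `incoming = incoming or []` : None and [] are falsy
  let inc : List Int := match incoming with | none => [] | some l => if l = [] then [] else l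
  let st := (PySem.List.enumerate demand 0).foldl
    (fun (s : List Int × Int × Option Int) (p : Int × Int) =>
      let stock0 := if p.1 < (inc.length : Int) then s.2.1 + PySem.List.pyGetD inc p.1 0 else s.2.1
      let stock := max (stock0 - p.2) 0
      let oos := if stock = 0 ∧ s.2.2 = none ∧ p.2 > 0 then some p.1 else s.2.2
      (s.1 ++ [stock], stock, oos)) ([], start_stock, none)
  (st.1, st.2.2)

-- ===== PORT B =====
def simulate_stock_alt (start_stock : Int) (demand : List Int) (incoming : Option (List Int)) : List Int × Option Int :=
  let inc : List Int := match incoming with | none => [] | some l => if l = [] then [] else l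
  -- net change per month
  let nets := (PySem.List.enumerate demand 0).map
    (fun p => (if p.1 < (inc.length : Int) then PySem.List.pyGetD inc p.1 0 else 0) - p.2)
  -- prefix sums with a running minimum
  let st := nets.foldl
    (fun (s : List Int × Int × Int) (net : Int) =>
      let p := s.2.1 + net
      let m := if p < s.2.2 then p else s.2.2
      (s.1 ++ [p - m], p, m)) ([], 0, -start_stock)
  let projection := st.1
  -- first month with zero stock and positive demand
  let oos := ((PySem.List.enumerate (projection.zip demand) 0).find?
      (fun p => p.2.1 == 0 && p.2.2 > 0)).map (·.1)
  (projection, oos)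

-- ===== PRECONDITION & SPEC =====
def Spec_simulate_stock (start_stock : Int) (demand : List Int) (incoming : Option (List Int)) (out : List Int × Option Int) : Prop := out = simulate_stock_alt start_stock demand incoming
instance (start_stock : Int) (demand : List Int) (incoming : Option (List Int)) (out : List Int × Option Int) : Decidable (Spec_simulate_stock start_stock demand incoming out) := by unfold Spec_simulate_stock; infer_instance

-- ===== CLAIM (what is proved, stated in full; the proofs are below) =====
def Claim_equal_simulate_stock : Prop := ∀ (start_stock : Int) (demand : List Int) (incoming : Option (List Int)), Dom_simulate_stock start_stock demand incoming → Spec_simulate_stock start_stock demand incoming (simulate_stock start_stock demand incoming)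

-- ===== LEMMAS AND PROOFS =====

-- one simulation step (A's recurrence)
def pvStep (inc : List Int) (n stock q : Int) : Int :=
  max ((if n < (inc.length : Int) then stock + PySem.List.pyGetD inc n 0 else stock) - q) 0

-- the net change at month n
def pvNet (inc : List Int) (n q : Int) : Int :=
  (if n < (inc.length : Int) then PySem.List.pyGetD inc n 0 else 0) - q

theorem pvStep_eq_net (inc : List Int) (n stock q : Int) :
    pvStep inc n stock q = max (stock + pvNet inc n q) 0 := by
  unfold pvStep pvNet; split <;> ring_nf

-- projection list starting at index n with current stock (A's semantics)
def pvProj (inc : List Int) : Int → Int → List Int → List Int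
  | _, _, [] => []
  | n, stock, q :: rest => pvStep inc n stock q :: pvProj inc (n+1) (pvStep inc n stock q) rest

-- first out-of-stock index
def pvOOS (inc : List Int) : Int → Int → List Int → Option Int
  | _, _, [] => none
  | n, stock, q :: rest =>
      if pvStep inc n stock q = 0 ∧ q > 0 then some n
      else pvOOS inc (n+1) (pvStep inc n stock q) rest

-- projection by nets alone (clamped running sum)
def pvProjN : Int → List Int → List Int
  | _, [] => []
  | stock, net :: rest => max (stock + net) 0 :: pvProjN (max (stock + net) 0) rest

theorem fA_eq (inc : List Int) :
    (fun (s : List Int × Int × Option Int) (p : Int × Int) =>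
      let stock0 := if p.1 < (inc.length : Int) then s.2.1 + PySem.List.pyGetD inc p.1 0 else s.2.1
      let stock := max (stock0 - p.2) 0
      let oos := if stock = 0 ∧ s.2.2 = none ∧ p.2 > 0 then some p.1 else s.2.2
      (s.1 ++ [stock], stock, oos))
    = (fun (s : List Int × Int × Option Int) (p : Int × Int) =>
        (s.1 ++ [pvStep inc p.1 s.2.1 p.2], pvStep inc p.1 s.2.1 p.2,
         if pvStep inc p.1 s.2.1 p.2 = 0 ∧ s.2.2 = none ∧ p.2 > 0 then some p.1 else s.2.2)) := by
  funext s p; rfl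

-- once oos becomes `some k`, A's fold never changes it
theorem foldA_keep (inc : List Int) (rest : List Int) : ∀ (i : Int) (a : List Int) (st k : Int),
    ((PySem.List.enumerate rest i).foldl
      (fun (s : List Int × Int × Option Int) (p : Int × Int) =>
        (s.1 ++ [pvStep inc p.1 s.2.1 p.2], pvStep inc p.1 s.2.1 p.2,
         if pvStep inc p.1 s.2.1 p.2 = 0 ∧ s.2.2 = none ∧ p.2 > 0 then some p.1 else s.2.2))
      (a, st, some k)).2.2 = some k := by
  induction rest with
  | nil => intro i a st k; simp [PySem.List.enumerate_nil]
  | cons r rs ih =>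
      intro i a st k
      rw [PySem.List.enumerate_cons]
      simp only [List.foldl_cons]
      rw [if_neg (by intro hc; simp at hc)]
      exact ih (i+1) _ _ k

theorem foldA_eq (inc : List Int) (dl : List Int) : ∀ (n stock : Int) (acc : List Int) (oos : Option Int),
    ((PySem.List.enumerate dl n).foldl
      (fun (s : List Int × Int × Option Int) (p : Int × Int) =>
        (s.1 ++ [pvStep inc p.1 s.2.1 p.2], pvStep inc p.1 s.2.1 p.2,
         if pvStep inc p.1 s.2.1 p.2 = 0 ∧ s.2.2 = none ∧ p.2 > 0 then some p.1 else s.2.2))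
      (acc, stock, oos)).1
      = acc ++ pvProj inc n stock dl ∧
    ((PySem.List.enumerate dl n).foldl
      (fun (s : List Int × Int × Option Int) (p : Int × Int) =>
        (s.1 ++ [pvStep inc p.1 s.2.1 p.2], pvStep inc p.1 s.2.1 p.2,
         if pvStep inc p.1 s.2.1 p.2 = 0 ∧ s.2.2 = none ∧ p.2 > 0 then some p.1 else s.2.2))
      (acc, stock, none)).2.2 = pvOOS inc n stock dl := by
  induction dl with
  | nil => intro n stock acc oos; simp [PySem.List.enumerate_nil, pvProj, pvOOS]
  | cons q rest ih =>
      intro n stock acc oos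
      rw [PySem.List.enumerate_cons]
      simp only [List.foldl_cons]
      constructor
      · rw [(ih (n+1) (pvStep inc n stock q) (acc ++ [pvStep inc n stock q]) _).1]
        simp [pvProj]
      · by_cases h : pvStep inc n stock q = 0 ∧ q > 0
        · rw [if_pos (by exact ⟨h.1, by constructor, h.2⟩)]
          have ho : pvOOS inc n stock (q :: rest) = some n := by
            simp only [pvOOS]; rw [if_pos h]
          rw [ho]
          exact foldA_keep inc rest (n+1) _ _ n
        · rw [if_neg (fun hc => h ⟨hc.1, hc.2.2⟩)]
          have ho : pvOOS inc n stock (q :: rest) = pvOOS inc (n+1) (pvStep inc n stock q) rest := by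
            simp only [pvOOS]; rw [if_neg h]
          rw [ho]
          exact (ih (n+1) (pvStep inc n stock q) (acc ++ [pvStep inc n stock q]) none).2

-- B's fold produces the clamped running sum: p - min(m, p) = max((p - m) + net, 0)
theorem foldB_eq (nets : List Int) : ∀ (p m : Int) (acc : List Int),
    (nets.foldl
      (fun (s : List Int × Int × Int) (net : Int) =>
        let p := s.2.1 + net
        let m := if p < s.2.2 then p else s.2.2
        (s.1 ++ [p - m], p, m)) (acc, p, m)).1
      = acc ++ pvProjN (p - m) nets := by
  induction nets with
  | nil => intro p m acc; simp [pvProjN]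
  | cons net rest ih =>
      intro p m acc
      simp only [List.foldl_cons]
      rw [ih]
      have h : (p + net) - (if p + net < m then p + net else m) = max ((p - m) + net) 0 := by
        split <;> omega
      simp [pvProjN, h]

-- the nets-based projection equals A's indexed projection
theorem projN_eq (inc : List Int) (dl : List Int) : ∀ (n stock : Int),
    pvProjN stock ((PySem.List.enumerate dl n).map
      (fun p => (if p.1 < (inc.length : Int) then PySem.List.pyGetD inc p.1 0 else 0) - p.2))
      = pvProj inc n stock dl := by
  induction dl with
  | nil => intro n stock; simp [PySem.List.enumerate_nil, pvProjN, pvProj]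
  | cons q rest ih =>
      intro n stock
      rw [PySem.List.enumerate_cons]
      simp only [List.map_cons, pvProjN, pvProj]
      have hn : (if n < (inc.length : Int) then PySem.List.pyGetD inc n 0 else 0) - q
          = pvNet inc n q := rfl
      rw [hn, ← pvStep_eq_net]
      rw [ih (n+1) (pvStep inc n stock q)]

theorem find_eq (inc : List Int) (dl : List Int) : ∀ (n stock : Int),
    ((PySem.List.enumerate ((pvProj inc n stock dl).zip dl) n).find?
        (fun p => p.2.1 == 0 && p.2.2 > 0)).map (·.1) = pvOOS inc n stock dl := by
  induction dl with
  | nil => intro n stock; simp [pvProj, pvOOS, PySem.List.enumerate_nil]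
  | cons q rest ih =>
      intro n stock
      simp only [pvProj, List.zip_cons_cons, PySem.List.enumerate_cons, List.find?_cons]
      by_cases h : pvStep inc n stock q = 0 ∧ q > 0
      · have hb : ((pvStep inc n stock q == 0 && decide (q > 0)) = true) := by
          simp [h.1, h.2]
        rw [hb]
        have ho : pvOOS inc n stock (q :: rest) = some n := by
          simp only [pvOOS]; rw [if_pos h]
        rw [ho]
        simp
      · have hb : ((pvStep inc n stock q == 0 && decide (q > 0)) = false) := by
          simp only [Bool.and_eq_false_iff, beq_eq_false_iff_ne, ne_eq, decide_eq_false_iff_not]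
          by_cases h1 : pvStep inc n stock q = 0
          · exact Or.inr (fun hq => h ⟨h1, hq⟩)
          · exact Or.inl h1
        rw [hb]
        have ho : pvOOS inc n stock (q :: rest) = pvOOS inc (n+1) (pvStep inc n stock q) rest := by
          simp only [pvOOS]; rw [if_neg h]
        rw [ho]
        simpa using ih (n+1) (pvStep inc n stock q)

-- ===== VERDICT (by name: the statement is the Claim_ definition above) =====
theorem simulate_stock_spec : Claim_equal_simulate_stock := by
  intro start_stock demand incoming _
  unfold Spec_simulate_stock simulate_stock simulate_stock_alt
  simp only [fA_eq]
  rw [foldB_eq]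
  have h0 : (0 : Int) - (-start_stock) = start_stock := by ring
  rw [h0, projN_eq]
  rw [(foldA_eq _ demand 0 start_stock [] none).1, (foldA_eq _ demand 0 start_stock [] none).2]
  simp only [List.nil_append]
  exact Prod.ext rfl (find_eq _ demand 0 start_stock).symm
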